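-- pv_equiv track=rewrite | github.com/parthjpatel99/Bctci-code-solutions | sorting/delete_operations.py | process_operations
-- ===== SOURCE A (Python) =====
-- def process_operations(nums, operations):
--     sorted_nums = sorted([(n, i) for i, n in enumerate(nums)])
--
--     c = 0
--     deleted_idx = set()
--     for op in operations:
--         if op >= 0:
--             nums[op] = None
--             deleted_idx.add(op)
--         if op == -1:
--             curr_smallest_idx = sorted_nums[c][1]
--             while curr_smallest_idx in deleted_idx:
--                 c += 1
--                 curr_smallest_idx = sorted_nums[c][1]
--             nums[curr_smallest_idx] = None
--             c += 1
--     return [n for n in nums if n is not None]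
-- ===== SOURCE B (Python) =====
-- def process_operations(nums, operations):
--     # Return-value equivalent to A; does not mutate nums (A sets deleted slots to None in place).
--     dead = set()
--     for op in operations:
--         if op >= 0:
--             dead.add(op)
--         elif op == -1:
--             _, smallest = min((n, i) for i, n in enumerate(nums) if i not in dead)
--             dead.add(smallest)
--     return [n for i, n in enumerate(nums) if i not in dead]
-- ===== Notes on version B (the rewrite author's own statement) =====
-- stated objective: simpler
-- what changed: B drops A's upfront sort of (value,index) pairs, the advancing pointer c and the lazy-skip while loop, keeping one `dead` index set and finding each delete-smallest target by a direct min scan over the live entries; B also does not mutate nums in place as A does.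
import Mathlib
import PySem

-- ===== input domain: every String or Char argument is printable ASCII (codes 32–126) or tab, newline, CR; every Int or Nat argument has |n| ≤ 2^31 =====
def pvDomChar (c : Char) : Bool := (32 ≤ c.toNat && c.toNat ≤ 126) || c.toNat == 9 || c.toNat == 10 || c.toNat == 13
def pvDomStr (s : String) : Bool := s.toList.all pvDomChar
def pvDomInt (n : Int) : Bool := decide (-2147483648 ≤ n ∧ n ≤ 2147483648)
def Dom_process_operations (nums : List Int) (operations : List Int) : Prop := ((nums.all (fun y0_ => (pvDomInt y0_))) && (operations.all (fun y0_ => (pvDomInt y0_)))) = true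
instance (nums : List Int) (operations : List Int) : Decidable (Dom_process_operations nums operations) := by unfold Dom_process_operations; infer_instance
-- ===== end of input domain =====

-- B replaces A's pre-sort + advancing pointer + lazy-skip with a single `dead` index set and a direct
-- minimum scan per delete-smallest operation (objective: simpler).  A mutates `nums` in place (sets
-- deleted slots to None); B does not — the equivalence proved here is about the return value.

-- ===== PORT A =====
-- inner `while curr_smallest_idx in deleted_idx: c += 1; curr = sorted_nums[c][1]` loop of A;
-- none = IndexError when c runs past the end of sorted_nums
def pvAdvance (s : List (Int × Int)) (del : PySem.Set Int) (c : Nat) : Option (Nat × Int) :=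
  match h : PySem.List.pyGet? s (c : Int) with
  | none => none
  | some p =>
    if PySem.Set.contains del p.2 then pvAdvance s del (c + 1) else some (c, p.2)
termination_by s.length - c
decreasing_by
  rw [PySem.List.pyGet?_natCast] at h
  have : c < s.length := by
    by_contra hc
    rw [List.getElem?_eq_none (by omega)] at h
    exact absurd h (by simp)
  omega

-- one iteration of A's `for op in operations` body; state = (nums-with-Nones, c, deleted_idx);
-- none = IndexError (out-of-range nums[op], or pvAdvance exhausted)
def pvAStep (s : List (Int × Int)) (st : List (Option Int) × Nat × PySem.Set Int) (op : Int) :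
    Option (List (Option Int) × Nat × PySem.Set Int) :=
  match (if 0 ≤ op then
           match PySem.List.pySet? st.1 op none with
           | none => none
           | some ns' => some (ns', st.2.1, PySem.Set.add st.2.2 op)
         else some st) with
  | none => none
  | some (ns, c, del) =>
    if op = -1 then
      match pvAdvance s del c with
      | none => none
      | some (j, idx) => some (PySem.List.pySetD ns idx none, j + 1, del)
    else some (ns, c, del)

-- error-propagating wrapper of pvAStep (a raised exception skips the rest of the loop)
def pvAFold (s : List (Int × Int)) (st : Option (List (Option Int) × Nat × PySem.Set Int))
    (op : Int) : Option (List (Option Int) × Nat × PySem.Set Int) :=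
  match st with
  | none => none
  | some t => pvAStep s t op

def process_operations (nums : List Int) (operations : List Int) : List Int :=
  match operations.foldl
      (pvAFold (PySem.List.sorted2 ((PySem.List.enumerate nums).map (fun p => (p.2, p.1)))
        (fun q => q.1) (fun q => q.2)))
      (some (nums.map Option.some, 0, ([] : PySem.Set Int))) with
  | none => []  -- Python raises here (outside Pre_)
  | some (ns, _, _) => ns.filterMap (fun x => x)  -- [n for n in nums if n is not None]

-- ===== PORT B =====
-- one iteration of B's loop; state = dead index set; none = ValueError (min of empty)
def pvBStep (nums : List Int) (dead : PySem.Set Int) (op : Int) : Option (PySem.Set Int) :=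
  if 0 ≤ op then some (PySem.Set.add dead op)
  else if op = -1 then
    match PySem.List.min2?
        (((PySem.List.enumerate nums).filter (fun p => !PySem.Set.contains dead p.1)).map
          (fun p => (p.2, p.1))) (fun q => q.1) (fun q => q.2) with
    | none => none
    | some m => some (PySem.Set.add dead m.2)
  else some dead

-- error-propagating wrapper of pvBStep
def pvBFold (nums : List Int) (st : Option (PySem.Set Int)) (op : Int) : Option (PySem.Set Int) :=
  match st with
  | none => none
  | some d => pvBStep nums d op

def process_operations_alt (nums : List Int) (operations : List Int) : List Int :=
  match operations.foldl (pvBFold nums) (some ([] : PySem.Set Int)) with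
  | none => []  -- Python raises here (outside Pre_)
  | some dead =>
    ((PySem.List.enumerate nums).filter (fun p => !PySem.Set.contains dead p.1)).map (fun p => p.2)

-- ===== PRECONDITION & SPEC =====
-- Pre_ excludes EXACTLY the inputs on which A raises (IndexError): a non-negative op ≥ len(nums), or a
-- delete-smallest issued when every index is already deleted.  Which index each delete-smallest removes
-- depends on the values in nums, so the second condition is stated as: the deleted-index set evolution
-- (add op for op ≥ 0; add the lexicographically smallest live (value, index)'s index for op = -1) never
-- meets a delete-smallest with no live index left.  A returns normally on every input admitted here.
def pvK (q : Int × Int) : Lex (Int × Int) := toLex q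

-- lexicographically smallest (value, index) pair among indices not yet deleted
def pvLiveMin (nums : List Int) (dead : PySem.Set Int) : Option (Int × Int) :=
  PySem.List.min?
    (((PySem.List.enumerate nums).filter (fun p => !PySem.Set.contains dead p.1)).map
      (fun p => (p.2, p.1))) pvK

-- the deleted-index-set evolution succeeds on ops (no delete-smallest finds everything deleted)
def pvSim (nums : List Int) (ops : List Int) (dead : PySem.Set Int) : Bool :=
  match ops with
  | [] => true
  | op :: rest =>
    if 0 ≤ op then pvSim nums rest (PySem.Set.add dead op)
    else if op = -1 then
      match pvLiveMin nums dead with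
      | none => false
      | some q => pvSim nums rest (PySem.Set.add dead q.2)
    else pvSim nums rest dead

def Pre_process_operations (nums : List Int) (operations : List Int) : Prop :=
  (∀ op ∈ operations, 0 ≤ op → op < (nums.length : Int)) ∧
  pvSim nums operations ([] : PySem.Set Int) = true
instance (nums : List Int) (operations : List Int) : Decidable (Pre_process_operations nums operations) := by
  unfold Pre_process_operations; infer_instance

def pvWitness_process_operations : List Int × List Int := ([5, 3], [-1, 1, -1])

def Spec_process_operations (nums : List Int) (operations : List Int) (out : List Int) : Prop :=
  out = process_operations_alt nums operations
instance (nums : List Int) (operations : List Int) (out : List Int) : Decidable (Spec_process_operations nums operations out) := by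
  unfold Spec_process_operations; infer_instance

-- ===== CLAIM (what is proved, stated in full; the proofs are below) =====
def Claim_equal_process_operations : Prop := ∀ (nums : List Int) (operations : List Int), Dom_process_operations nums operations → Pre_process_operations nums operations → Spec_process_operations nums operations (process_operations nums operations)

-- ===== LEMMAS AND PROOFS =====

theorem pvLexBool (a b : Int × Int) :
    (decide (a.1 < b.1) || (!decide (b.1 < a.1) && decide (a.2 < b.2))) = decide (pvK a < pvK b) := by
  simp only [pvK, Prod.Lex.toLex_lt_toLex]
  rcases lt_trichotomy a.1 b.1 with h | h | h <;> simp [h, le_of_eq, not_lt.mpr, h.le] <;> omega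

theorem pvSorted2_eq (xs : List (Int × Int)) :
    PySem.List.sorted2 xs (fun q => q.1) (fun q => q.2) = PySem.List.sorted xs pvK := by
  rw [PySem.List.sorted_eq_foldl_insertBy]
  simp only [PySem.List.sorted2]
  congr 1
  funext acc x
  congr 1
  funext a b
  exact pvLexBool a b

theorem pvMin2_eq (xs : List (Int × Int)) :
    PySem.List.min2? xs (fun q => q.1) (fun q => q.2) = PySem.List.min? xs pvK := by
  simp only [PySem.List.min2?, PySem.List.min?]
  congr 1
  funext acc x
  match acc with
  | none => rfl
  | some m => simp only [pvLexBool x m, decide_eq_true_eq]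

def pvP (nums : List Int) : List (Int × Int) :=
  (PySem.List.enumerate nums).map (fun p => (p.2, p.1))
def pvS (nums : List Int) : List (Int × Int) := PySem.List.sorted (pvP nums) pvK

theorem pvMem_pvP (nums : List Int) (q : Int × Int) :
    q ∈ pvP nums ↔ ∃ k : Nat, ∃ h : k < nums.length, q = (nums[k], (k : Int)) := by
  simp only [pvP, List.mem_map]
  constructor
  · rintro ⟨p, hp, rfl⟩
    rw [PySem.List.mem_enumerate_iff] at hp
    obtain ⟨k, hk, rfl⟩ := hp
    exact ⟨k, hk, by simp⟩
  · rintro ⟨k, hk, rfl⟩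
    refine ⟨((k : Int), nums[k]), ?_, rfl⟩
    rw [PySem.List.mem_enumerate_iff]
    exact ⟨k, hk, by simp⟩

theorem pvS_perm (nums : List Int) : (pvS nums).Perm (pvP nums) :=
  PySem.List.sorted_perm _ _ _

theorem pvMem_pvS (nums : List Int) (q : Int × Int) :
    q ∈ pvS nums ↔ ∃ k : Nat, ∃ h : k < nums.length, q = (nums[k], (k : Int)) := by
  rw [(pvS_perm nums).mem_iff, pvMem_pvP]

theorem pvNodup_snd (nums : List Int) : ((pvS nums).map (fun q => q.2)).Nodup := by
  have hperm : ((pvS nums).map (fun q => q.2)).Perm ((pvP nums).map (fun q => q.2)) :=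
    (pvS_perm nums).map _
  rw [hperm.nodup_iff]
  have : (pvP nums).map (fun q => q.2) = (PySem.List.enumerate nums 0).map (fun p => p.1) := by
    simp [pvP, List.map_map, Function.comp]
  rw [this]
  have hp := PySem.List.pairwise_lt_enumerate nums 0
  exact List.pairwise_map.mpr (hp.imp fun h => ne_of_lt h)

theorem pvS_strict (nums : List Int) {p q : Nat} (hpq : p < q) (hq : q < (pvS nums).length) :
    pvK ((pvS nums)[p]'(by omega)) < pvK ((pvS nums)[q]'(hq)) := by
  have hle : pvK ((pvS nums)[p]'(by omega)) ≤ pvK ((pvS nums)[q]'(hq)) :=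
    PySem.List.key_sorted_getElem_mono (pvP nums) pvK (le_of_lt hpq) hq
  rcases lt_or_eq_of_le hle with h | h
  · exact h
  · exfalso
    have hinj : ((pvS nums)[p]'(by omega)) = ((pvS nums)[q]'(hq)) := by
      have := congrArg ofLex h
      simpa [pvK] using this
    have hnd := pvNodup_snd nums
    have hpq' : p ≠ q := Nat.ne_of_lt hpq
    have : (((pvS nums).map (fun q => q.2))[p]'(by simpa using by omega)) =
           (((pvS nums).map (fun q => q.2))[q]'(by simpa using hq)) := by
      simp only [List.getElem_map]
      rw [hinj]
    exact hpq' (List.Nodup.getElem_inj_iff hnd |>.mp this)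

structure pvInv (nums : List Int) (ns : List (Option Int)) (c : Nat)
    (del dead : PySem.Set Int) : Prop where
  hlen : ns.length = nums.length
  hns : ∀ k : Nat, ns[k]? =
    (nums[k]?).map (fun v => if (k : Int) ∈ dead then none else some v)
  hc : c ≤ (pvS nums).length
  hbef : ∀ j : Nat, ∀ q : Int × Int, j < c → (pvS nums)[j]? = some q → q.2 ∈ dead
  hdead : ∀ x : Int, x ∈ dead ↔
    (x ∈ del ∨ ∃ j : Nat, ∃ q : Int × Int, j < c ∧ (pvS nums)[j]? = some q ∧ q.2 = x)

theorem pvAdvance_go (nums : List Int) (del dead : PySem.Set Int)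
    (hdel_sub : ∀ x ∈ del, x ∈ dead) :
    ∀ fuel c : Nat, (pvS nums).length - c = fuel →
    (∀ j : Nat, ∀ q : Int × Int, j < c → (pvS nums)[j]? = some q → q.2 ∈ dead) →
    (∃ i : Nat, i < nums.length ∧ (i : Int) ∉ dead) →
    ∃ j : Nat, ∃ q : Int × Int, c ≤ j ∧ (pvS nums)[j]? = some q ∧
      pvAdvance (pvS nums) del c = some (j, q.2) ∧ q.2 ∉ del ∧
      (∀ j' : Nat, ∀ q' : Int × Int, c ≤ j' → j' < j → (pvS nums)[j']? = some q' → q'.2 ∈ del) := by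
  intro fuel
  induction fuel using Nat.strong_induction_on with
  | _ fuel ih =>
    intro c hfuel hbef hlive
    obtain ⟨i, hi, hidead⟩ := hlive
    have hmem : ((nums[i], (i : Int)) : Int × Int) ∈ pvS nums := by
      rw [pvMem_pvS]; exact ⟨i, hi, rfl⟩
    obtain ⟨ji, hji, hjieq⟩ := List.mem_iff_getElem.mp hmem
    have hclt : c < (pvS nums).length := by
      by_contra hcge
      have : ((pvS nums)[ji]).2 ∈ dead := by
        apply hbef ji _ (by omega)
        exact List.getElem?_eq_some_iff.mpr ⟨hji, rfl⟩
      rw [hjieq] at this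
      exact hidead this
    have hget : PySem.List.pyGet? (pvS nums) (c : Int) = some ((pvS nums)[c]'hclt) := by
      rw [PySem.List.pyGet?_natCast]
      exact List.getElem?_eq_some_iff.mpr ⟨hclt, rfl⟩
    have hstep : pvAdvance (pvS nums) del c =
        (if PySem.Set.contains del ((pvS nums)[c]'hclt).2 then pvAdvance (pvS nums) del (c + 1)
         else some (c, ((pvS nums)[c]'hclt).2)) := by
      rw [pvAdvance, hget]
    by_cases hdc : ((pvS nums)[c]'hclt).2 ∈ del
    · -- skip position c
      have hcontains : PySem.Set.contains del ((pvS nums)[c]'hclt).2 = true := by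
        simpa [PySem.Set.contains, List.contains_iff_mem] using hdc
      have hbef' : ∀ j : Nat, ∀ q : Int × Int, j < c + 1 → (pvS nums)[j]? = some q → q.2 ∈ dead := by
        intro j q hj hq
        rcases Nat.lt_or_ge j c with h | h
        · exact hbef j q h hq
        · have : j = c := by omega
          subst this
          have : q = (pvS nums)[j]'hclt := by
            have := List.getElem?_eq_some_iff.mp hq
            obtain ⟨h1, h2⟩ := this
            simp [← h2]
          subst this
          exact hdel_sub _ hdc
      obtain ⟨j, q, hcj, hjq, hadv, hqd, hskip⟩ :=
        ih ((pvS nums).length - (c + 1)) (by omega) (c + 1) rfl hbef' ⟨i, hi, hidead⟩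
      refine ⟨j, q, by omega, hjq, ?_, hqd, ?_⟩
      · rw [hstep, if_pos hcontains]; exact hadv
      · intro j' q' hcj' hj' hq'
        rcases Nat.lt_or_ge j' (c + 1) with h | h
        · have : j' = c := by omega
          subst this
          have : q' = (pvS nums)[j']'hclt := by
            obtain ⟨h1, h2⟩ := List.getElem?_eq_some_iff.mp hq'
            simp [← h2]
          subst this
          exact hdc
        · exact hskip j' q' h hj' hq'
    · -- found
      have hcontains : PySem.Set.contains del ((pvS nums)[c]'hclt).2 = false := by
        simpa [PySem.Set.contains, List.contains_iff_mem] using hdc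
      refine ⟨c, (pvS nums)[c]'hclt, le_refl c,
        List.getElem?_eq_some_iff.mpr ⟨hclt, rfl⟩, ?_, hdc, ?_⟩
      · rw [hstep]; rw [hcontains]; simp
      · intro j' q' h1 h2 _; omega

theorem pvSnd_inj (nums : List Int) {j1 j2 : Nat} {q1 q2 : Int × Int}
    (h1 : (pvS nums)[j1]? = some q1) (h2 : (pvS nums)[j2]? = some q2)
    (heq : q1.2 = q2.2) : j1 = j2 := by
  obtain ⟨hl1, he1⟩ := List.getElem?_eq_some_iff.mp h1
  obtain ⟨hl2, he2⟩ := List.getElem?_eq_some_iff.mp h2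
  have hnd := pvNodup_snd nums
  have key : (((pvS nums).map (fun q => q.2))[j1]'(by simpa using hl1)) =
      (((pvS nums).map (fun q => q.2))[j2]'(by simpa using hl2)) := by
    simp only [List.getElem_map]
    rw [he1, he2]; exact heq
  exact (List.Nodup.getElem_inj_iff hnd).mp key

theorem pvMem_L (nums : List Int) (dead : PySem.Set Int) (y : Int × Int) :
    y ∈ ((PySem.List.enumerate nums).filter (fun p => !PySem.Set.contains dead p.1)).map
        (fun p => (p.2, p.1)) ↔ y ∈ pvP nums ∧ y.2 ∉ dead := by
  simp only [List.mem_map, List.mem_filter, pvP, Bool.not_eq_eq_eq_not, Bool.not_true,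
    PySem.Set.contains]
  constructor
  · rintro ⟨p, ⟨hp, hcon⟩, rfl⟩
    refine ⟨⟨p, hp, rfl⟩, ?_⟩
    exact fun h => by simp [List.contains_iff_mem] at hcon; exact hcon (by simpa using h)
  · rintro ⟨⟨p, hp, rfl⟩, hdead⟩
    refine ⟨p, ⟨hp, ?_⟩, rfl⟩
    rw [← Bool.not_eq_true]
    exact fun hcon => hdead (List.contains_iff_mem.mp hcon)

theorem pvMin_spec (nums : List Int) (c : Nat) (del dead : PySem.Set Int)
    (hc : c ≤ (pvS nums).length)
    (hbef : ∀ j : Nat, ∀ q : Int × Int, j < c → (pvS nums)[j]? = some q → q.2 ∈ dead)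
    (hdead : ∀ x : Int, x ∈ dead ↔
      (x ∈ del ∨ ∃ j : Nat, ∃ q : Int × Int, j < c ∧ (pvS nums)[j]? = some q ∧ q.2 = x))
    (j : Nat) (q : Int × Int) (hcj : c ≤ j) (hj : (pvS nums)[j]? = some q) (hqdel : q.2 ∉ del)
    (hskip : ∀ j' : Nat, ∀ q' : Int × Int, c ≤ j' → j' < j → (pvS nums)[j']? = some q' → q'.2 ∈ del) :
    PySem.List.min?
      (((PySem.List.enumerate nums).filter (fun p => !PySem.Set.contains dead p.1)).map
        (fun p => (p.2, p.1))) pvK = some q := by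
  set L := ((PySem.List.enumerate nums).filter (fun p => !PySem.Set.contains dead p.1)).map
      (fun p => (p.2, p.1)) with hL
  have hqdead : q.2 ∉ dead := by
    rw [hdead]
    rintro (h | ⟨j', q', hj'c, hj', hq'⟩)
    · exact hqdel h
    · have : j' = j := pvSnd_inj nums hj' hj hq'
      omega
  have hqmemS : q ∈ pvS nums := List.mem_of_getElem? hj
  have hqmemP : q ∈ pvP nums := (pvS_perm nums).mem_iff.mp hqmemS
  have hqL : q ∈ L := (pvMem_L nums dead q).mpr ⟨hqmemP, hqdead⟩
  -- q is ≤ every live element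
  have hmin : ∀ y ∈ L, pvK q ≤ pvK y := by
    intro y hy
    obtain ⟨hyP, hydead⟩ := (pvMem_L nums dead y).mp hy
    have hyS : y ∈ pvS nums := (pvS_perm nums).mem_iff.mpr hyP
    obtain ⟨jy, hjy, hjyeq⟩ := List.mem_iff_getElem.mp hyS
    have hjyq : (pvS nums)[jy]? = some y := List.getElem?_eq_some_iff.mpr ⟨hjy, hjyeq⟩
    have hjyc : c ≤ jy := by
      by_contra h
      exact hydead (hbef jy y (by omega) hjyq)
    have hjyj : j ≤ jy := by
      by_contra h
      have : y.2 ∈ del := hskip jy y hjyc (by omega) hjyq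
      exact hydead ((hdead y.2).mpr (Or.inl this))
    rcases Nat.eq_or_lt_of_le hjyj with h | h
    · subst h
      have : y = q := by
        obtain ⟨_, he⟩ := List.getElem?_eq_some_iff.mp hj
        rw [← he, hjyeq]
      rw [this]
    · exact le_of_lt (by
        have := pvS_strict nums h hjy
        obtain ⟨_, he⟩ := List.getElem?_eq_some_iff.mp hj
        rw [he, hjyeq] at this
        exact this)
  -- extract the min
  rcases hmm : PySem.List.min? L pvK with _ | m
  · rw [PySem.List.min?_eq_none_iff] at hmm
    rw [hmm] at hqL
    exact absurd hqL (List.not_mem_nil)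
  · have hmL : m ∈ L := PySem.List.min?_mem hmm
    have h1 : pvK m ≤ pvK q := PySem.List.min?_isMin hmm q hqL
    have h2 : pvK q ≤ pvK m := hmin m hmL
    have : pvK m = pvK q := le_antisymm h1 h2
    have : m = q := by
      have := congrArg ofLex this
      simpa [pvK] using this
    rw [this]

theorem pvFilterMapAux (dead : PySem.Set Int) (l : List (Int × Int)) :
    (l.map (fun p => if PySem.Set.contains dead p.1 then none else some p.2)).filterMap
        (fun x => x) =
      (l.filter (fun p => !PySem.Set.contains dead p.1)).map (fun p => p.2) := by
  induction l with
  | nil => rfl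
  | cons p t ih =>
    by_cases h : p.1 ∈ dead
    · simp only [PySem.Set.contains, List.contains_iff_mem] at ih ⊢
      simp [h, ih]
    · simp only [PySem.Set.contains, List.contains_iff_mem] at ih ⊢
      simp [h, ih]

theorem pvFinal (nums : List Int) (ns : List (Option Int)) (dead : PySem.Set Int)
    (hns : ∀ k : Nat, ns[k]? = (nums[k]?).map (fun v => if (k : Int) ∈ dead then none else some v)) :
    ns.filterMap (fun x => x) =
      ((PySem.List.enumerate nums).filter (fun p => !PySem.Set.contains dead p.1)).map
        (fun p => p.2) := by
  have hns' : ns = (PySem.List.enumerate nums).map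
      (fun p => if PySem.Set.contains dead p.1 then none else some p.2) := by
    apply List.ext_getElem?
    intro k
    rw [hns k, List.getElem?_map, PySem.List.getElem?_enumerate]
    cases h : nums[k]? with
    | none => rfl
    | some v =>
      simp only [Option.map_some]
      congr 1
      simp [PySem.Set.contains, List.contains_iff_mem]
  rw [hns']
  exact pvFilterMapAux dead (PySem.List.enumerate nums)

theorem pvSnd_bounds (nums : List Int) {j : Nat} {q : Int × Int}
    (h : (pvS nums)[j]? = some q) : 0 ≤ q.2 ∧ q.2 < (nums.length : Int) := by
  have hq : q ∈ pvS nums := List.mem_of_getElem? h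
  rw [pvMem_pvS] at hq
  obtain ⟨k, hk, rfl⟩ := hq
  refine ⟨Int.natCast_nonneg k, ?_⟩
  show (k : Int) < (nums.length : Int)
  exact_mod_cast hk

theorem pvStepNonneg (nums : List Int) (ns : List (Option Int)) (c : Nat)
    (del dead : PySem.Set Int) (op : Int)
    (inv : pvInv nums ns c del dead) (h0 : 0 ≤ op) (hop : op < (nums.length : Int)) :
    pvInv nums (ns.set op.toNat none) c (PySem.Set.add del op) (PySem.Set.add dead op) := by
  have hopn : op.toNat < nums.length := by omega
  have hcast : ((op.toNat : Int)) = op := Int.toNat_of_nonneg h0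
  refine ⟨?_, ?_, inv.hc, ?_, ?_⟩
  · rw [List.length_set]; exact inv.hlen
  · intro k
    rw [List.getElem?_set]
    by_cases hk : op.toNat = k
    · subst hk
      rw [if_pos rfl, if_pos (by rw [inv.hlen]; exact hopn)]
      rw [List.getElem?_eq_some_iff.mpr ⟨hopn, rfl⟩]
      simp only [Option.map_some]
      rw [if_pos (by rw [PySem.Set.mem_add]; exact Or.inr hcast)]
    · rw [if_neg hk, inv.hns k]
      cases h : nums[k]? with
      | none => rfl
      | some v =>
        simp only [Option.map_some]
        congr 1
        have : ((k : Int) ∈ PySem.Set.add dead op) ↔ ((k : Int) ∈ dead) := by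
          rw [PySem.Set.mem_add]
          constructor
          · rintro (h | h)
            · exact h
            · exfalso; apply hk; omega
          · exact Or.inl
        simp only [this]
  · intro j q hj hq
    rw [PySem.Set.mem_add]
    exact Or.inl (inv.hbef j q hj hq)
  · intro x
    rw [PySem.Set.mem_add, PySem.Set.mem_add, inv.hdead x]
    constructor
    · rintro (⟨h | h⟩ | h)
      · exact Or.inl (Or.inl h)
      · exact Or.inr h
      · exact Or.inl (Or.inr h)
    · rintro (⟨h | h⟩ | h)
      · exact Or.inl (Or.inl h)
      · exact Or.inr h
      · exact Or.inl (Or.inr h)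

theorem pvStepPopInv (nums : List Int) (ns : List (Option Int)) (c : Nat)
    (del dead : PySem.Set Int) (j : Nat) (q : Int × Int)
    (inv : pvInv nums ns c del dead) (hcj : c ≤ j) (hj : (pvS nums)[j]? = some q)
    (hqdel : q.2 ∉ del)
    (hskip : ∀ j' : Nat, ∀ q' : Int × Int, c ≤ j' → j' < j → (pvS nums)[j']? = some q' → q'.2 ∈ del) :
    pvInv nums (ns.set q.2.toNat none) (j + 1) del (PySem.Set.add dead q.2) := by
  have hbnd := pvSnd_bounds nums hj
  have hcast : ((q.2.toNat : Int)) = q.2 := Int.toNat_of_nonneg hbnd.1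
  have hqn : q.2.toNat < nums.length := by omega
  have hjlt : j < (pvS nums).length := (List.getElem?_eq_some_iff.mp hj).1
  have hdelsub : ∀ x ∈ del, x ∈ dead := fun x hx => (inv.hdead x).mpr (Or.inl hx)
  refine ⟨?_, ?_, by omega, ?_, ?_⟩
  · rw [List.length_set]; exact inv.hlen
  · intro k
    rw [List.getElem?_set]
    by_cases hk : q.2.toNat = k
    · subst hk
      rw [if_pos rfl, if_pos (by rw [inv.hlen]; exact hqn)]
      rw [List.getElem?_eq_some_iff.mpr ⟨hqn, rfl⟩]
      simp only [Option.map_some]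
      rw [if_pos (by rw [PySem.Set.mem_add]; exact Or.inr hcast)]
    · rw [if_neg hk, inv.hns k]
      cases h : nums[k]? with
      | none => rfl
      | some v =>
        simp only [Option.map_some]
        congr 1
        have : ((k : Int) ∈ PySem.Set.add dead q.2) ↔ ((k : Int) ∈ dead) := by
          rw [PySem.Set.mem_add]
          constructor
          · rintro (h | h)
            · exact h
            · exfalso; apply hk; omega
          · exact Or.inl
        simp only [this]
  · intro j' q' hj' hq'
    rw [PySem.Set.mem_add]
    rcases Nat.lt_or_ge j' c with h | h
    · exact Or.inl (inv.hbef j' q' h hq')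
    · rcases Nat.lt_or_ge j' j with h2 | h2
      · exact Or.inl (hdelsub _ (hskip j' q' h h2 hq'))
      · have : j' = j := by omega
        subst this
        have : q' = q := by rw [hj] at hq'; exact (Option.some_inj.mp hq'.symm)
        subst this
        exact Or.inr rfl
  · intro x
    rw [PySem.Set.mem_add]
    constructor
    · rintro (h | h)
      · rcases (inv.hdead x).mp h with h1 | ⟨j', q', hj'c, hj', hq'⟩
        · exact Or.inl h1
        · exact Or.inr ⟨j', q', by omega, hj', hq'⟩
      · exact Or.inr ⟨j, q, by omega, hj, h.symm⟩
    · rintro (h | ⟨j', q', hj'c, hj', hq'⟩)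
      · exact Or.inl (hdelsub _ h)
      · rcases Nat.lt_or_ge j' c with h2 | h2
        · exact Or.inl ((inv.hdead x).mpr (Or.inr ⟨j', q', h2, hj', hq'⟩))
        · rcases Nat.lt_or_ge j' j with h3 | h3
          · exact Or.inl (hdelsub _ (by rw [← hq']; exact hskip j' q' h2 h3 hj'))
          · have : j' = j := by omega
            subst this
            rw [hj] at hj'
            have : q' = q := Option.some_inj.mp hj'.symm
            subst this
            exact Or.inr hq'.symm

theorem pvMain (nums : List Int) :
    ∀ (rest : List Int) (ns : List (Option Int)) (c : Nat) (del dead : PySem.Set Int),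
    (∀ op ∈ rest, 0 ≤ op → op < (nums.length : Int)) →
    pvSim nums rest dead = true →
    pvInv nums ns c del dead →
    ∃ ns' : List (Option Int), ∃ c' : Nat, ∃ del' dead' : PySem.Set Int,
      rest.foldl (pvAFold (pvS nums)) (some (ns, c, del)) = some (ns', c', del') ∧
      rest.foldl (pvBFold nums) (some dead) = some dead' ∧
      pvInv nums ns' c' del' dead' := by
  intro rest
  induction rest with
  | nil =>
    intro ns c del dead h1 hsim inv
    exact ⟨ns, c, del, dead, rfl, rfl, inv⟩
  | cons op rest' ih =>
    intro ns c del dead h1 hsim inv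
    have h1' : ∀ o ∈ rest', 0 ≤ o → o < (nums.length : Int) :=
      fun o ho => h1 o (List.mem_cons_of_mem op ho)
    have hdelsub : ∀ x ∈ del, x ∈ dead := fun x hx => (inv.hdead x).mpr (Or.inl hx)
    by_cases h0 : 0 ≤ op
    · -- delete by index
      have hop : op < (nums.length : Int) := h1 op List.mem_cons_self h0
      have hcast : ((op.toNat : Int)) = op := Int.toNat_of_nonneg h0
      have hset : PySem.List.pySet? ns op none = some (ns.set op.toNat none) := by
        rw [← hcast]
        exact PySem.List.pySet?_natCast ns op.toNat none (by rw [inv.hlen]; omega)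
      have hA : pvAStep (pvS nums) (ns, c, del) op =
          some (ns.set op.toNat none, c, PySem.Set.add del op) := by
        simp only [pvAStep, if_pos h0, hset]
        rw [if_neg (by omega : ¬ op = -1)]
      have hB : pvBStep nums dead op = some (PySem.Set.add dead op) := by
        simp only [pvBStep, if_pos h0]
      have hsim' : pvSim nums rest' (PySem.Set.add dead op) = true := by
        rw [pvSim, if_pos h0] at hsim
        exact hsim
      have inv' := pvStepNonneg nums ns c del dead op inv h0 hop
      obtain ⟨ns', c', del', dead', hfa, hfb, hinv⟩ :=
        ih (ns.set op.toNat none) c (PySem.Set.add del op) (PySem.Set.add dead op)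
          h1' hsim' inv'
      refine ⟨ns', c', del', dead', ?_, ?_, hinv⟩
      · rw [List.foldl_cons]
        have h' : pvAFold (pvS nums) (some (ns, c, del)) op =
            some (ns.set op.toNat none, c, PySem.Set.add del op) := hA
        rw [h']
        exact hfa
      · rw [List.foldl_cons]
        have h' : pvBFold nums (some dead) op = some (PySem.Set.add dead op) := hB
        rw [h']
        exact hfb
    · by_cases hm1 : op = -1
      · -- delete smallest
        subst hm1
        -- Pre_'s evolution succeeds at this step: some live element exists
        rw [pvSim, if_neg h0, if_pos rfl] at hsim
        rcases hlm : pvLiveMin nums dead with _ | m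
        · rw [hlm] at hsim; exact absurd hsim (by simp)
        rw [hlm] at hsim
        have hmL := PySem.List.min?_mem hlm
        obtain ⟨hmP, hmdead⟩ := (pvMem_L nums dead m).mp hmL
        obtain ⟨i, hi, hmi⟩ := (pvMem_pvP nums m).mp hmP
        have hlive : ∃ i : Nat, i < nums.length ∧ (i : Int) ∉ dead :=
          ⟨i, hi, by rw [hmi] at hmdead; exact hmdead⟩
        obtain ⟨j, q, hcj, hj, hadv, hqdel, hskip⟩ :=
          pvAdvance_go nums del dead hdelsub ((pvS nums).length - c) c rfl inv.hbef hlive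
        have hmin := pvMin_spec nums c del dead inv.hc inv.hbef inv.hdead j q hcj hj hqdel hskip
        have hmq : m = q := by
          have : pvLiveMin nums dead = some q := hmin
          rw [hlm] at this
          exact Option.some_inj.mp this
        subst hmq
        have inv' := pvStepPopInv nums ns c del dead j m inv hcj hj hqdel hskip
        have hbnd := pvSnd_bounds nums hj
        have hA : pvAStep (pvS nums) (ns, c, del) (-1) =
            some (ns.set m.2.toNat none, j + 1, del) := by
          simp only [pvAStep, if_neg (by omega : ¬ (0 : Int) ≤ -1), if_true]
          rw [hadv]
          show some (PySem.List.pySetD ns m.2 none, j + 1, del) = _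
          rw [PySem.List.pySetD_of_nonneg ns none hbnd.1]
        have hB : pvBStep nums dead (-1) = some (PySem.Set.add dead m.2) := by
          simp only [pvBStep, if_neg (by omega : ¬ (0 : Int) ≤ -1), if_true]
          rw [pvMin2_eq]
          show (match PySem.List.min? _ pvK with
            | none => none
            | some m' => some (PySem.Set.add dead m'.2)) = _
          rw [hmin]
        obtain ⟨ns', c', del', dead', hfa, hfb, hinv⟩ :=
          ih (ns.set m.2.toNat none) (j + 1) del (PySem.Set.add dead m.2)
            h1' hsim inv'
        refine ⟨ns', c', del', dead', ?_, ?_, hinv⟩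
        · rw [List.foldl_cons]
          have h' : pvAFold (pvS nums) (some (ns, c, del)) (-1) =
              some (ns.set m.2.toNat none, j + 1, del) := hA
          rw [h']
          exact hfa
        · rw [List.foldl_cons]
          have h' : pvBFold nums (some dead) (-1) = some (PySem.Set.add dead m.2) := hB
          rw [h']
          exact hfb
      · -- other negative ops are no-ops
        have hA : pvAStep (pvS nums) (ns, c, del) op = some (ns, c, del) := by
          simp only [pvAStep, if_neg h0]
          rw [if_neg hm1]
        have hB : pvBStep nums dead op = some dead := by
          simp only [pvBStep, if_neg h0]
          rw [if_neg hm1]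
        have hsim' : pvSim nums rest' dead = true := by
          rw [pvSim, if_neg h0, if_neg hm1] at hsim
          exact hsim
        obtain ⟨ns', c', del', dead', hfa, hfb, hinv⟩ :=
          ih ns c del dead h1' hsim' inv
        refine ⟨ns', c', del', dead', ?_, ?_, hinv⟩
        · rw [List.foldl_cons]
          have h' : pvAFold (pvS nums) (some (ns, c, del)) op = some (ns, c, del) := hA
          rw [h']
          exact hfa
        · rw [List.foldl_cons]
          have h' : pvBFold nums (some dead) op = some dead := hB
          rw [h']
          exact hfb

theorem pvInitInv (nums : List Int) :
    pvInv nums (nums.map Option.some) 0 ([] : PySem.Set Int) ([] : PySem.Set Int) := by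
  refine ⟨by simp, ?_, by omega, ?_, ?_⟩
  · intro k
    rw [List.getElem?_map]
    cases h : nums[k]? <;> simp
  · intro j q hj _; omega
  · intro x; simp

-- ===== VERDICT (by name: the statement is the Claim_ definition above) =====
theorem process_operations_spec : Claim_equal_process_operations := by
  unfold Claim_equal_process_operations
  intro nums operations _ hpre
  unfold Spec_process_operations
  obtain ⟨h1, h2⟩ := hpre
  have hs : PySem.List.sorted2 ((PySem.List.enumerate nums).map (fun p => (p.2, p.1)))
      (fun q => q.1) (fun q => q.2) = pvS nums := by
    rw [pvSorted2_eq]; rfl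
  obtain ⟨ns', c', del', dead', hfa, hfb, hinv⟩ :=
    pvMain nums operations (nums.map Option.some) 0 ([] : PySem.Set Int) ([] : PySem.Set Int)
      h1 h2 (pvInitInv nums)
  simp only [process_operations, process_operations_alt, hs]
  rw [hfa, hfb]
  exact pvFinal nums ns' dead' hinv.hns
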